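-- pv_equiv track=rewrite | github.com/nitwi/Roblox-Bot-Investigator | RBI_Bot.py | friend_matches_inexact
-- ===== SOURCE A (Python) =====
-- def friend_matches_inexact(
--     friend_assets: set[int],
--     combos: list[tuple[str, set[int]]]
-- ) -> list[tuple[str, int, int]]:
--     matched: list[tuple[str, int, int]] = []
--     for label, ids in combos:
--         if not ids:
--             continue
--         overlap = friend_assets.intersection(ids)
--         if overlap:
--             matched.append((label, len(overlap), len(ids)))
--     return matched
-- ===== SOURCE B (Python) =====
-- def friend_matches_inexact(
--     friend_assets: set[int],
--     combos: list[tuple[str, set[int]]]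
-- ) -> list[tuple[str, int, int]]:
--     # Inverted index: asset id -> combo indices containing it.
--     index: dict[int, list[int]] = {}
--     for i, (_label, ids) in enumerate(combos):
--         for a in ids:
--             index.setdefault(a, []).append(i)
--     # Scan the friend's assets through the index, accumulating per-combo overlap counts.
--     counts: dict[int, int] = {}
--     for a in friend_assets:
--         for i in index.get(a, ()):
--             counts[i] = counts.get(i, 0) + 1
--     # Emit in original combo order; un-hit combos (including empty ones) are skipped.
--     result: list[tuple[str, int, int]] = []
--     for i, (label, ids) in enumerate(combos):
--         c = counts.get(i, 0)
--         if c: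
--             result.append((label, c, len(ids)))
--     return result
-- ===== Notes on version B (the rewrite author's own statement) =====
-- stated objective: alternative
-- what changed: Replaces the per-combo set intersection with an inverted index (asset id -> combo indices) scanned by the friend's assets to accumulate per-combo overlap counters, then a final walk over combos in order.
import Mathlib
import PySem

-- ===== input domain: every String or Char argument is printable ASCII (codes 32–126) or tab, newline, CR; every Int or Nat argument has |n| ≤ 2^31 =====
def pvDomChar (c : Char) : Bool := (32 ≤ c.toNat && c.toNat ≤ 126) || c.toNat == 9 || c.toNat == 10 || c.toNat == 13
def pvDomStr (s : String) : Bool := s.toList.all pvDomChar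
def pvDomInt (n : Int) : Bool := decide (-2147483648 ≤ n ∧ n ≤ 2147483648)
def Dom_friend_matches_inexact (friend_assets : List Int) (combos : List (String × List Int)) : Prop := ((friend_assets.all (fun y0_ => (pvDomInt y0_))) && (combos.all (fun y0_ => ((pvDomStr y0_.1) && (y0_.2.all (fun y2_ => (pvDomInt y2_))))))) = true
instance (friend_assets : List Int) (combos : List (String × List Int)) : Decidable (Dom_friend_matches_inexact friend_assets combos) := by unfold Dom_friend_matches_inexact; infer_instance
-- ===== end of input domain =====

-- B replaces the per-combo set intersection with an inverted index scanned by the friend's assets ("alternative" objective; same results, different traversal).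

-- ===== PORT A =====
-- set.intersection(ids) is ported as a filter of friend_assets by membership; exact since both set
-- arguments are duplicate-free lists (Pre_).
def friend_matches_inexact (friend_assets : List Int) (combos : List (String × List Int)) : List (String × Int × Int) :=
  combos.foldl (fun matched lc =>
    if lc.2.isEmpty then matched
    else
      let overlap := friend_assets.filter (fun a => lc.2.contains a)
      if overlap.isEmpty then matched
      else matched ++ [(lc.1, (overlap.length : Int), (lc.2.length : Int))]) []

-- ===== PORT B =====
-- index.setdefault(a, []).append(i) is Dict.modify a [] (· ++ [i]); counts[i] = counts.get(i, 0) + 1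
-- is Dict.insert i (getD i 0 + 1); 'if c:' on an int is 'if c ≠ 0'.
def friend_matches_inexact_alt (friend_assets : List Int) (combos : List (String × List Int)) : List (String × Int × Int) :=
  let index : PySem.Dict Int (List Int) :=
    (PySem.List.enumerate combos).foldl (fun d p =>
      p.2.2.foldl (fun d a => d.modify a [] (· ++ [p.1])) d) PySem.Dict.empty
  let counts : PySem.Dict Int Int :=
    friend_assets.foldl (fun c a =>
      (index.getD a []).foldl (fun c i => c.insert i (c.getD i 0 + 1)) c) PySem.Dict.empty
  (PySem.List.enumerate combos).foldl (fun res p =>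
    let c := counts.getD p.1 0
    if c ≠ 0 then res ++ [(p.2.1, c, (p.2.2.length : Int))] else res) []

-- ===== PRECONDITION & SPEC =====
-- Pre_ only states that the set-typed arguments (friend_assets and each combo's ids, Python sets)
-- are represented by duplicate-free lists, as the List-for-set type convention requires.
def Pre_friend_matches_inexact (friend_assets : List Int) (combos : List (String × List Int)) : Prop :=
  friend_assets.Nodup ∧ ∀ p ∈ combos, p.2.Nodup
instance (friend_assets : List Int) (combos : List (String × List Int)) : Decidable (Pre_friend_matches_inexact friend_assets combos) := by unfold Pre_friend_matches_inexact; infer_instance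
def pvWitness_friend_matches_inexact : List Int × (List (String × List Int)) := ([1, 2], [("a", [1, 3]), ("b", [])])
def Spec_friend_matches_inexact (friend_assets : List Int) (combos : List (String × List Int)) (out : List (String × Int × Int)) : Prop := out = friend_matches_inexact_alt friend_assets combos
instance (friend_assets : List Int) (combos : List (String × List Int)) (out : List (String × Int × Int)) : Decidable (Spec_friend_matches_inexact friend_assets combos out) := by unfold Spec_friend_matches_inexact; infer_instance

-- ===== CLAIM (what is proved, stated in full; the proofs are below) =====
def Claim_equal_friend_matches_inexact : Prop := ∀ (friend_assets : List Int) (combos : List (String × List Int)), Dom_friend_matches_inexact friend_assets combos → Pre_friend_matches_inexact friend_assets combos → Spec_friend_matches_inexact friend_assets combos (friend_matches_inexact friend_assets combos)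

-- ===== LEMMAS AND PROOFS =====

-- overlap size: |friend_assets ∩ ids| (both duplicate-free)
def ovl (fa ids : List Int) : Nat := (fa.filter (fun a => ids.contains a)).length

-- the inverted index, flattened to (asset, combo-index) pairs
def idxL (combos : List (String × List Int)) : List (Int × Int) :=
  (PySem.List.enumerate combos).flatMap (fun p => p.2.2.map (fun a => (a, p.1)))

lemma idx_spec (combos : List (String × List Int)) (a : Int) :
    ((PySem.List.enumerate combos).foldl
        (fun d p => p.2.2.foldl (fun d a => d.modify a [] (fun x => x ++ [p.1])) d)
        PySem.Dict.empty).getD a []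
    = ((idxL combos).filter (fun q => q.1 == a)).map (·.2) := by
  have h1 : (fun (d : PySem.Dict Int (List Int)) (p : Int × (String × List Int)) =>
      p.2.2.foldl (fun d a => d.modify a [] (fun x => x ++ [p.1])) d)
      = fun d p => (p.2.2.map (fun a => (a, p.1))).foldl
          (fun d q => d.modify q.1 [] (fun x => x ++ [q.2])) d := by
    funext d p; rw [List.foldl_map]
  rw [h1, ← List.foldl_flatMap, PySem.Dict.getD_foldl_modify_append]
  simp [idxL]

lemma count_snd_filter (a j : Int) (L : List (Int × Int)) :
    ((L.filter (fun q => q.1 == a)).map (·.2)).count j = L.count (a, j) := by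
  induction L with
  | nil => simp
  | cons q L ih =>
    obtain ⟨x, y⟩ := q
    by_cases hx : x = a
    · subst hx
      simp only [List.filter_cons, beq_self_eq_true, if_true, List.map_cons, List.count_cons, ih]
      by_cases hy : y = j <;> simp [hy]
    · have hb : ((x, y).1 == a) = false := by simpa using hx
      simp only [List.filter_cons, hb, Bool.false_eq_true, if_false, ih, List.count_cons]
      have hne : ((x, y) == (a, j)) = false := by
        simp only [beq_eq_false_iff_ne, ne_eq, Prod.mk.injEq, not_and]
        exact fun h => absurd h hx
      simp [hne]

lemma count_pair_map (i j a : Int) (ids : List Int) :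
    (ids.map (fun x => (x, i))).count (a, j) = if i = j then ids.count a else 0 := by
  induction ids with
  | nil => simp
  | cons x ids ih =>
    simp only [List.map_cons, List.count_cons, ih]
    by_cases h : i = j <;> by_cases h2 : x = a <;>
      simp [h, h2, Prod.ext_iff]

lemma count_flatMap' {α : Type} (f : α → List (Int × Int)) (v : Int × Int) :
    ∀ (l : List α), (l.flatMap f).count v = (l.map (fun x => (f x).count v)).sum := by
  intro l
  induction l with
  | nil => simp
  | cons x l ih => simp [List.flatMap_cons, List.count_append, ih]

lemma sum_enum_pick (F : (String × List Int) → Nat) :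
    ∀ (cs : List (String × List Int)) (s : Int) (k : Nat) (hk : k < cs.length),
    ((PySem.List.enumerate cs s).map (fun p => if p.1 = s + (k : Int) then F p.2 else 0)).sum
      = F cs[k] := by
  intro cs
  induction cs with
  | nil => intro s k hk; simp at hk
  | cons c cs ih =>
    intro s k hk
    rw [PySem.List.enumerate_cons]
    simp only [List.map_cons, List.sum_cons]
    cases k with
    | zero =>
      have e0 : s + ((0 : Nat) : Int) = s := by norm_num
      rw [e0]
      have hz : ((PySem.List.enumerate cs (s + 1)).map (fun p => if p.1 = s then F p.2 else 0)).sum = 0 := by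
        apply List.sum_eq_zero
        intro x hx
        obtain ⟨p, hp, hpx⟩ := List.mem_map.mp hx
        obtain ⟨m, hm, rfl⟩ := (PySem.List.mem_enumerate_iff _ _ _).mp hp
        have hne : ¬ ((s + 1 + (m : Int)) = s) := by omega
        rw [← hpx]; simp [hne]
      rw [hz]; simp
    | succ m =>
      have hne : ¬ (s = s + ((m + 1 : Nat) : Int)) := by push_cast; omega
      rw [if_neg hne]
      have heq : (fun (p : Int × (String × List Int)) => if p.1 = s + ((m + 1 : Nat) : Int) then F p.2 else 0)
           = fun p => if p.1 = (s + 1) + (m : Int) then F p.2 else 0 := by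
        funext p
        have h3 : s + ((m + 1 : Nat) : Int) = (s + 1) + (m : Int) := by push_cast; ring
        rw [h3]
      rw [heq, ih (s + 1) m (Nat.succ_lt_succ_iff.mp (by simpa using hk))]
      simp

lemma count_idxL (combos : List (String × List Int)) (a : Int) (k : Nat) (hk : k < combos.length) :
    (idxL combos).count (a, (0 : Int) + (k : Int)) = (combos[k].2).count a := by
  unfold idxL
  rw [count_flatMap']
  simp only [count_pair_map]
  exact sum_enum_pick (fun c => c.2.count a) combos 0 k hk

lemma counts_getD (index : PySem.Dict Int (List Int)) :
    ∀ (fa : List Int) (c : PySem.Dict Int Int) (j : Int),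
    (fa.foldl (fun c a => (index.getD a []).foldl (fun c i => c.insert i (c.getD i 0 + 1)) c) c).getD j 0
      = c.getD j 0 + (fa.map (fun a => (((index.getD a []).count j : Int)))).sum := by
  intro fa
  induction fa with
  | nil => intro c j; simp
  | cons a fa ih =>
    intro c j
    simp only [List.foldl_cons, List.map_cons, List.sum_cons, ih,
      PySem.Dict.getD_foldl_insert_add_one]
    ring

lemma sum_ind (ids : List Int) : ∀ (fa : List Int),
    (fa.map (fun a => if ids.contains a then (1 : Int) else 0)).sum = (ovl fa ids : Int) := by
  intro fa
  induction fa with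
  | nil => simp [ovl]
  | cons a fa ih =>
    simp only [ovl, List.map_cons, List.sum_cons, List.filter_cons] at ih ⊢
    by_cases h : ids.contains a = true
    · rw [if_pos h, if_pos h, ih, List.length_cons]
      push_cast; ring
    · rw [if_neg h, if_neg h, ih]
      ring

lemma final_eq (fa : List Int) (cnt : Int → Int) :
    ∀ (cs : List (String × List Int)) (s : Int),
    (∀ (k : Nat) (hk : k < cs.length), cnt (s + (k : Int)) = (ovl fa (cs[k].2) : Int)) →
    ((PySem.List.enumerate cs s).filter (fun p => decide (cnt p.1 ≠ 0))).map
        (fun p => (p.2.1, cnt p.1, (p.2.2.length : Int)))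
    = (cs.filter (fun c => !(fa.filter (fun a => c.2.contains a)).isEmpty)).map
        (fun c => (c.1, ((ovl fa c.2 : Nat) : Int), (c.2.length : Int))) := by
  intro cs
  induction cs with
  | nil => intro s h; simp
  | cons c cs ih =>
    intro s h
    rw [PySem.List.enumerate_cons]
    have h0 : cnt s = (ovl fa c.2 : Int) := by
      have := h 0 (by simp)
      simpa using this
    have htail : ∀ (k : Nat) (hk : k < cs.length), cnt ((s + 1) + (k : Int)) = (ovl fa (cs[k].2) : Int) := by
      intro k hk
      have h4 := h (k + 1) (by simpa using Nat.succ_lt_succ hk)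
      have h5 : s + ((k + 1 : Nat) : Int) = (s + 1) + (k : Int) := by push_cast; ring
      rw [h5] at h4
      simpa using h4
    have hcond : (decide (cnt s ≠ 0)) = (!(fa.filter (fun a => c.2.contains a)).isEmpty) := by
      rw [h0]
      cases hb : (fa.filter (fun a => c.2.contains a)).isEmpty with
      | true =>
        have hnil : fa.filter (fun a => c.2.contains a) = [] := List.isEmpty_iff.mp hb
        have hov : ovl fa c.2 = 0 := by unfold ovl; rw [hnil]; rfl
        simp [hov]
      | false =>
        have hne : fa.filter (fun a => c.2.contains a) ≠ [] := by
          intro hnil; rw [hnil] at hb; simp at hb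
        have hov : ovl fa c.2 ≠ 0 := by
          unfold ovl
          simpa [List.length_eq_zero_iff] using hne
        simp [hov]
    simp only [List.filter_cons, hcond]
    cases hb : (fa.filter (fun a => c.2.contains a)).isEmpty with
    | true =>
      simp only [Bool.not_true, Bool.false_eq_true, if_false]
      exact ih (s + 1) htail
    | false =>
      simp only [Bool.not_false, if_true, List.map_cons]
      rw [ih (s + 1) htail, h0]

-- ===== VERDICT (by name: the statement is the Claim_ definition above) =====
theorem friend_matches_inexact_spec : Claim_equal_friend_matches_inexact := by
  intro fa combos _ hpre
  obtain ⟨hfa, hids⟩ := hpre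
  unfold Spec_friend_matches_inexact
  -- A-side: fold with two guards = filter-then-map
  have hA : friend_matches_inexact fa combos
      = (combos.filter (fun c => !(fa.filter (fun a => c.2.contains a)).isEmpty)).map
          (fun c => (c.1, ((ovl fa c.2 : Nat) : Int), (c.2.length : Int))) := by
    unfold friend_matches_inexact
    have hfun : (fun (matched : List (String × Int × Int)) (lc : String × List Int) =>
        if lc.2.isEmpty then matched
        else
          let overlap := fa.filter (fun a => lc.2.contains a)
          if overlap.isEmpty then matched
          else matched ++ [(lc.1, (overlap.length : Int), (lc.2.length : Int))])
        = fun matched lc =>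
            if (!(fa.filter (fun a => lc.2.contains a)).isEmpty) = true
            then matched ++ [(lc.1, ((ovl fa lc.2 : Nat) : Int), (lc.2.length : Int))]
            else matched := by
      funext m lc
      by_cases h : lc.2.isEmpty = true
      · have hnil : lc.2 = [] := List.isEmpty_iff.mp h
        have hf : fa.filter (fun a => lc.2.contains a) = [] := by
          rw [hnil]; simp
        simp only [h, if_true, hf, List.isEmpty_nil, Bool.not_true, Bool.false_eq_true, if_false]
      · rw [if_neg h]
        cases h2 : (fa.filter (fun a => lc.2.contains a)).isEmpty with
        | true => simp only [h2, if_true, Bool.not_true, Bool.false_eq_true, if_false]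
        | false => simp only [h2, Bool.false_eq_true, if_false, Bool.not_false, if_true, ovl]
    rw [hfun]
    simp only [PySem.List.foldl_append_if, List.nil_append]
  rw [hA]
  -- B-side
  simp only [friend_matches_inexact_alt, PySem.List.foldl_append_ite, List.nil_append]
  refine Eq.symm (final_eq fa (fun i =>
      ((fa.foldl (fun c a =>
        ((((PySem.List.enumerate combos).foldl
            (fun d p => p.2.2.foldl (fun d a => d.modify a [] (fun x => x ++ [p.1])) d)
            PySem.Dict.empty)).getD a []).foldl (fun c i => c.insert i (c.getD i 0 + 1)) c)
        PySem.Dict.empty).getD i 0)) combos 0 ?_)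
  intro k hk
  show ((fa.foldl _ PySem.Dict.empty).getD ((0 : Int) + (k : Int)) 0) = _
  rw [counts_getD]
  rw [PySem.Dict.getD_empty, zero_add]
  have hsummand : ∀ a : Int,
      (((PySem.List.enumerate combos).foldl
          (fun d p => p.2.2.foldl (fun d a => d.modify a [] (fun x => x ++ [p.1])) d)
          PySem.Dict.empty).getD a []).count ((0 : Int) + (k : Int))
        = (combos[k].2).count a := by
    intro a
    rw [idx_spec, count_snd_filter, count_idxL combos a k hk]
  simp only [hsummand]
  have hnod : (combos[k]).2.Nodup := hids combos[k] (List.getElem_mem hk)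
  have hcount : ∀ a : Int, (combos[k].2).count a = if (combos[k].2).contains a then 1 else 0 := by
    intro a
    by_cases hm : a ∈ combos[k].2
    · rw [if_pos (by simpa using hm)]
      exact List.count_eq_one_of_mem hnod hm
    · rw [if_neg (by simpa using hm)]
      exact List.count_eq_zero_of_not_mem hm
  simp only [hcount]
  have hpush : ∀ a : Int, (((if (combos[k].2).contains a then 1 else 0 : Nat) : Int))
      = if (combos[k].2).contains a then (1 : Int) else 0 := by
    intro a; split <;> simp
  simp only [hpush]
  exact sum_ind (combos[k].2) fa
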